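-- pv_equiv track=rewrite | github.com/vlad-marlo/algorithms | school/mr/march/1/2.py | solution
-- ===== SOURCE A (Python) =====
-- def solution(data: list[int]) -> tuple[int, int]:
--     m, __count = 0, 0
--     # max num ending on 12
--
--     for i in range(len(data) - 1):
--         if len(list(filter(lambda x: abs(x) % 100 == 12, data[i:i + 2]))) == 1 and sum(
--                 map(lambda x: x ** 2, data[i:i + 2])) < max(list(filter(lambda x: abs(x) % 100 == 12, data))) ** 2:
--             __count += 1
--             m = max(m, sum(map(lambda x: x ** 2, data[i:i + 2])))
--     return __count, m
-- ===== SOURCE B (Python) =====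
-- def solution(data: list[int]) -> tuple[int, int]:
--     n = len(data)
--     special = [j for j in range(n) if abs(data[j]) % 100 == 12]
--     if not special:
--         return 0, 0
--     t = max(data[j] for j in special) ** 2
--     count, best = 0, 0
--     for j in special:
--         if j > 0 and abs(data[j - 1]) % 100 != 12:
--             s = data[j - 1] ** 2 + data[j] ** 2
--             if s < t:
--                 count += 1
--                 best = max(best, s)
--         if j + 1 < n and abs(data[j + 1]) % 100 != 12:
--             s = data[j] ** 2 + data[j + 1] ** 2
--             if s < t:
--                 count += 1
--                 best = max(best, s)
--     return count, best
-- ===== Notes on version B (the rewrite author's own statement) =====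
-- stated objective: faster
-- what changed: B first collects the indices of 'special' (abs%100==12) elements, exits early if there are none, computes the threshold once, and then visits only each special index's two neighbours with running count/max accumulators - instead of A's scan over every adjacent pair that re-slices, re-filters and recomputes the whole-list max inside each iteration.
import Mathlib
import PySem

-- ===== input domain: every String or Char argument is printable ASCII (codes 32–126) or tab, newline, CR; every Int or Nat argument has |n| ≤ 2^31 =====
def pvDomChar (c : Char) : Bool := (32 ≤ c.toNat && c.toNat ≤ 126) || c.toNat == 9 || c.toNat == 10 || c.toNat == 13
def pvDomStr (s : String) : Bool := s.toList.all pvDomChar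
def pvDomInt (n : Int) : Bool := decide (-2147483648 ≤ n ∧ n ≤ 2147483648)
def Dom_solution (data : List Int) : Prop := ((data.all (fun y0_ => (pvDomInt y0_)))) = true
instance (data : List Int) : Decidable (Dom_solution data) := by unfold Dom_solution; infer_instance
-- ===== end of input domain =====

-- B collects the special indices (abs%100==12) once, exits early when there are none, computes
-- the threshold once, and then inspects only each special index's two neighbours with running
-- count/max accumulators (objective: faster; A rescans slices and the whole-list max per pair).

-- ===== PORT A =====
-- lambda x: abs(x) % 100 == 12  (divisor 100 is positive, PySem.Int.mod is Python's %)
def pvEnds12 (x : Int) : Bool := PySem.Int.mod |x| 100 == 12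

-- sum(map(lambda x: x ** 2, l))
def pvSumSq (l : List Int) : Int := (l.map (fun x => x ^ 2)).sum

def solution (data : List Int) : Int × Int :=
  -- state (st.1, st.2) = (__count, m); Python returns __count, m
  (PySem.List.pyRange 0 ((data.length : Int) - 1) 1).foldl
    (fun st i =>
      if ((PySem.List.slice data (some i) (some (i + 2))).filter pvEnds12).length == 1 then
        -- Python evaluates max(...) lazily, after the first conjunct: the guard guarantees a
        -- matching element exists in data, so the 'none' (ValueError) branch is unreachable.
        match PySem.List.max? (data.filter pvEnds12) (fun y => y) with
        | some mx =>
          if pvSumSq (PySem.List.slice data (some i) (some (i + 2))) < mx ^ 2 then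
            (st.1 + 1, max st.2 (pvSumSq (PySem.List.slice data (some i) (some (i + 2)))))
          else st
        | none => st
      else st)
    ((0 : Int), (0 : Int))

-- ===== PORT B =====
def solution_alt (data : List Int) : Int × Int :=
  let n : Int := (data.length : Int)
  let special := (PySem.List.pyRange 0 n 1).filter
      (fun j => pvEnds12 (PySem.List.pyGetD data j 0))
  if special.isEmpty then (0, 0)
  else
    -- special is non-empty, so the generator max(...) has elements: 'none' is unreachable
    match PySem.List.max? (special.map (fun j => PySem.List.pyGetD data j 0)) (fun y => y) with
    | some mv =>
      let t := mv ^ 2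
      special.foldl
        (fun st j =>
          let st1 :=
            if decide (0 < j) && !pvEnds12 (PySem.List.pyGetD data (j - 1) 0) then
              let s := (PySem.List.pyGetD data (j - 1) 0) ^ 2 + (PySem.List.pyGetD data j 0) ^ 2
              if s < t then (st.1 + 1, max st.2 s) else st
            else st
          if decide (j + 1 < n) && !pvEnds12 (PySem.List.pyGetD data (j + 1) 0) then
            let s := (PySem.List.pyGetD data j 0) ^ 2 + (PySem.List.pyGetD data (j + 1) 0) ^ 2
            if s < t then (st1.1 + 1, max st1.2 s) else st1
          else st1)
        ((0 : Int), (0 : Int))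
    | none => (0, 0)

-- ===== PRECONDITION & SPEC =====
def Spec_solution (data : List Int) (out : Int × Int) : Prop := out = solution_alt data
instance (data : List Int) (out : Int × Int) : Decidable (Spec_solution data out) := by unfold Spec_solution; infer_instance

-- ===== CLAIM (what is proved, stated in full; the proofs are below) =====
def Claim_equal_solution : Prop := ∀ (data : List Int), Dom_solution data → Spec_solution data (solution data)

-- ===== LEMMAS AND PROOFS =====

-- the pair of squares
def pvSq (xy : Int × Int) : Int := xy.1 ^ 2 + xy.2 ^ 2

-- data.getD with Nat index (the common currency of both proofs)
def pvGetd (data : List Int) (k : Nat) : Int := data.getD k 0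
def pvQ (data : List Int) (k : Nat) : Bool := pvEnds12 (pvGetd data k)
def pvPair (data : List Int) (k : Nat) : Int × Int := (pvGetd data k, pvGetd data (k + 1))
def pvC (data : List Int) (t : Int) (k : Nat) : Bool := decide (pvSq (pvPair data k) < t)

-- the (threshold-filtered) pairs B's loop body emits at a special index k
def pvG (data : List Int) (t : Int) (k : Nat) : List (Int × Int) :=
  (if decide (0 < k) && !pvQ data (k - 1) && pvC data t (k - 1)
   then [pvPair data (k - 1)] else []) ++
  (if decide (k + 1 < data.length) && !pvQ data (k + 1) && pvC data t k
   then [pvPair data k] else [])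

def pvGG (data : List Int) (t : Int) (k : Nat) : List (Int × Int) :=
  if pvQ data k then pvG data t k else []

-- after processing the special indices below m, pair k has been emitted iff it is a
-- right-neighbour pair (special at k) or a left-neighbour pair whose special index k+1 < m
def pvPhi (data : List Int) (t : Int) (m k : Nat) : List (Int × Int) :=
  if (pvQ data k && !pvQ data (k + 1) ||
      (!pvQ data k && pvQ data (k + 1) && decide (k + 1 < m))) &&
     decide (k + 1 < data.length) && pvC data t k
  then [pvPair data k] else []

theorem pvSumSq_pair (x y : Int) : pvSumSq [x, y] = pvSq (x, y) := by
  simp [pvSumSq, pvSq]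

-- data[i:i+2] for 0 ≤ i < (data.zip data.tail).length is the i-th adjacent pair
theorem pvSlice2_eq (data : List Int) (k : Nat)
    (hk : k < (data.zip data.tail).length) :
    PySem.List.slice data (some (k : Int)) (some ((k : Int) + 2)) =
      [(data.zip data.tail)[k].1, (data.zip data.tail)[k].2] := by
  have hlen : k + 1 < data.length := by
    simp [List.length_zip] at hk; omega
  have h2 : ((k : Int) + 2) = ((k : Int) + ((2 : Nat) : Int)) := by norm_num
  rw [h2, PySem.List.slice_natCast_add]
  rw [List.drop_eq_getElem_cons (by omega : k < data.length), List.drop_eq_getElem_cons hlen]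
  simp only [List.getElem_zip, List.getElem_tail]
  rfl

-- A's index loop over range(len(data)-1), whose body depends on i only through data[i:i+2],
-- is the fold over the adjacent pairs
theorem pvFoldl_slice2 {β : Type} (data : List Int) (f : β → List Int → β) (init : β) :
    (PySem.List.pyRange 0 ((data.length : Int) - 1) 1).foldl
      (fun st i => f st (PySem.List.slice data (some i) (some (i + 2)))) init
    = (data.zip data.tail).foldl (fun st xy => f st [xy.1, xy.2]) init := by
  have hrange : PySem.List.pyRange 0 ((data.length : Int) - 1) 1
      = PySem.List.pyRange 0 ((data.zip data.tail).length : Int) 1 := by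
    cases data with
    | nil => rw [PySem.List.pyRange_one_eq_nil (by norm_num), PySem.List.pyRange_one_eq_nil (by simp)]
    | cons x t => simp [List.length_zip]
  rw [hrange]
  rw [PySem.List.foldl_congr_mem _ _
      (fun st j => f st [(PySem.List.pyGetD (data.zip data.tail) j (0, 0)).1,
                         (PySem.List.pyGetD (data.zip data.tail) j (0, 0)).2]) init ?_]
  · exact PySem.List.foldl_pyRange_zero_pyGetD' (data.zip data.tail) (0, 0)
      (fun st xy => f st [xy.1, xy.2]) init
  · intro acc i hi
    rw [PySem.List.mem_pyRange_one] at hi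
    have hk : i.toNat < (data.zip data.tail).length := by omega
    have hi' : i = (i.toNat : Int) := by omega
    show f acc (PySem.List.slice data (some i) (some (i + 2)))
        = f acc [(PySem.List.pyGetD (data.zip data.tail) i (0, 0)).1,
                 (PySem.List.pyGetD (data.zip data.tail) i (0, 0)).2]
    rw [hi', pvSlice2_eq data i.toNat hk,
        PySem.List.pyGetD_natCast, List.getD_eq_getElem _ _ hk]

theorem pvPairFilter_len (x y : Int) :
    ((([x, y].filter pvEnds12).length == 1) : Bool) = (pvEnds12 x != pvEnds12 y) := by
  cases hx : pvEnds12 x <;> cases hy : pvEnds12 y <;> simp [List.filter, hx, hy]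

-- running max from 0 over a list of nonnegative values is max(l, default=0)
theorem pvFoldlMax_nonneg (S : List Int) (h : ∀ s ∈ S, 0 ≤ s) :
    S.foldl max 0 = (PySem.List.max? S (fun y => y)).getD 0 := by
  cases S with
  | nil => rfl
  | cons x t =>
    rw [PySem.List.max?_id_cons]
    have hx : max 0 x = x := max_eq_right (h x (by simp))
    simp [List.foldl_cons, hx]

-- the shared count/max fold over the final list of qualifying pairs
theorem pvFoldPairs (F : List (Int × Int)) :
    F.foldl (fun st xy => (st.1 + 1, max st.2 (pvSq xy))) ((0 : Int), (0 : Int))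
      = ((F.length : Int), (PySem.List.max? (F.map pvSq) (fun y => y)).getD 0) := by
  rw [PySem.List.foldl_prod_mk (f := fun c (_ : Int × Int) => c + 1)
      (g := fun m xy => max m (pvSq xy))]
  have hc : F.foldl (fun c (_ : Int × Int) => c + 1) 0 = (F.length : Int) := by
    rw [PySem.List.foldl_add (g := fun _ => (1 : Int))]
    rw [PySem.List.sum_map_const_int]; ring
  have hm : F.foldl (fun m xy => max m (pvSq xy)) 0
      = (PySem.List.max? (F.map pvSq) (fun y => y)).getD 0 := by
    rw [← List.foldl_map (f := pvSq) (g := max)]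
    exact pvFoldlMax_nonneg _ (by
      intro s hs
      rcases List.mem_map.mp hs with ⟨xy, _, rfl⟩
      exact add_nonneg (sq_nonneg _) (sq_nonneg _))
  rw [hc, hm]

-- general list plumbing (facts about flatMap the library does not provide)
theorem pvFoldl_flatMap {α β γ : Type} (l : List α) (f : α → List β)
    (step : γ → β → γ) (init : γ) :
    (l.flatMap f).foldl step init = l.foldl (fun st x => (f x).foldl step st) init := by
  induction l generalizing init with
  | nil => rfl
  | cons x xs ih => simp [List.flatMap_cons, List.foldl_append, ih]

theorem pvFlatMap_filter {α β : Type} (l : List α) (p : α → Bool) (f : α → List β) :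
    (l.filter p).flatMap f = l.flatMap (fun x => if p x then f x else []) := by
  induction l with
  | nil => rfl
  | cons x xs ih => cases hx : p x <;> simp [hx, ih]

theorem pvFlatMap_if_singleton {α β : Type} (l : List α) (p : α → Bool) (f : α → β) :
    l.flatMap (fun x => if p x then [f x] else []) = (l.filter p).map f := by
  induction l with
  | nil => rfl
  | cons x xs ih => cases hx : p x <;> simp [hx, ih]

theorem pvFlatMap_congr {α β : Type} (l : List α) (f g : α → List β)
    (h : ∀ x ∈ l, f x = g x) : l.flatMap f = l.flatMap g := by
  induction l with
  | nil => rfl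
  | cons x xs ih => simp [List.flatMap_cons, h x (by simp), ih (fun y hy => h y (by simp [hy]))]

-- reading the list back off its indices
theorem pvMapGet (data : List Int) :
    (List.range data.length).map (pvGetd data) = data := by
  apply List.ext_getElem
  · simp
  · intro i h1 h2
    simp [pvGetd, List.getD_eq_getElem?_getD, List.getElem?_eq_getElem h2]

theorem pvZip_eq (data : List Int) :
    data.zip data.tail = (List.range (data.length - 1)).map (pvPair data) := by
  apply List.ext_getElem
  · simp [List.length_zip, List.length_tail]
  · intro i h1 h2
    simp only [List.length_zip, List.length_tail] at h1
    have hi : i + 1 < data.length := by omega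
    simp [List.getElem_zip, List.getElem_tail, pvPair, pvGetd,
      List.getD_eq_getElem?_getD,
      List.getElem?_eq_getElem (by omega : i < data.length),
      List.getElem?_eq_getElem hi]

-- the invariant of B's sweep over the special indices
theorem pvMain (data : List Int) (t : Int) :
    ∀ m, m ≤ data.length →
      (List.range m).flatMap (pvGG data t) = (List.range m).flatMap (pvPhi data t m) := by
  intro m
  induction m with
  | zero => intro _; rfl
  | succ m ih =>
    intro h
    have hmN : m < data.length := by omega
    rw [List.range_succ, List.flatMap_append, List.flatMap_append, ih (by omega)]
    simp only [List.flatMap_cons, List.flatMap_nil, List.append_nil]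
    cases m with
    | zero =>
      cases hq0 : pvQ data 0 <;> cases hq1 : pvQ data 1 <;>
        simp [pvGG, pvG, pvPhi, hq0, hq1]
    | succ r =>
      rw [List.range_succ, List.flatMap_append, List.flatMap_append]
      simp only [List.flatMap_cons, List.flatMap_nil, List.append_nil]
      have hagree : (List.range r).flatMap (pvPhi data t (r + 1))
          = (List.range r).flatMap (pvPhi data t (r + 2)) := by
        apply pvFlatMap_congr
        intro k hk
        have hk' : k < r := List.mem_range.mp hk
        simp only [pvPhi]
        have : decide (k + 1 < r + 1) = decide (k + 1 < r + 2) := by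
          simp [decide_eq_decide]; omega
        rw [this]
      rw [hagree, List.append_assoc, List.append_assoc]
      congr 1
      -- the boundary: what φ_(r+1) misses at r is exactly the left pair of special r+1
      cases hq : pvQ data (r + 1) <;>
        cases hqr : pvQ data r <;>
          cases hq2 : pvQ data (r + 2) <;>
            simp [pvPhi, pvGG, pvG, hq, hqr, hq2, hmN]
  -- (cases above rely on decide (r+1 < r+1) = false, decide (r+1 < r+2) = true etc., via simp)

-- the pairs emitted by the sweep are exactly A's qualifying adjacent pairs, in order
theorem pvEmit_eq_filter (data : List Int) (t : Int) :
    (List.range data.length).flatMap (pvGG data t)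
      = (data.zip data.tail).filter
          (fun xy => (pvEnds12 xy.1 != pvEnds12 xy.2) && decide (pvSq xy < t)) := by
  rw [pvMain data t data.length le_rfl]
  rw [pvZip_eq, List.filter_map]
  rw [show pvPhi data t data.length = (fun k =>
      if (pvQ data k && !pvQ data (k + 1) ||
          (!pvQ data k && pvQ data (k + 1) && decide (k + 1 < data.length))) &&
         decide (k + 1 < data.length) && pvC data t k
      then [pvPair data k] else []) from rfl]
  rw [pvFlatMap_if_singleton (f := pvPair data)
      (p := fun k => (pvQ data k && !pvQ data (k + 1) ||
        (!pvQ data k && pvQ data (k + 1) && decide (k + 1 < data.length))) &&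
        decide (k + 1 < data.length) && pvC data t k)]
  congr 1
  cases hN : data.length with
  | zero => rfl
  | succ n =>
    have hlast : ∀ b c : Bool,
        ((b && !pvQ data (n + 1) || (!b && pvQ data (n + 1) && decide (n + 1 < n + 1))) &&
          decide (n + 1 < n + 1) && c) = false := by
      intro b c; simp
    rw [List.range_succ, List.filter_append]
    simp only [List.filter_cons, hlast, List.filter_nil, Nat.add_sub_cancel,
      Bool.false_eq_true, if_false, List.append_nil]
    apply List.filter_congr
    intro k hk
    have hk' : k < n := List.mem_range.mp hk
    have h1 : decide (k + 1 < n + 1) = true := by simp; omega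
    simp only [h1, Bool.and_true, Function.comp]
    cases hqk : pvQ data k <;> cases hqk1 : pvQ data (k + 1) <;>
      simp [pvQ, pvPair, pvC, pvGetd] at hqk hqk1 ⊢ <;>
        simp [hqk, hqk1]


-- B's loop body at a special index ↑k is the count/max fold over the pairs pvG emits there
set_option maxHeartbeats 1000000 in
theorem pvBody_eq (data : List Int) (t : Int) (st : Int × Int) (k : Nat) :
    (let st1 :=
        if decide (0 < ((k : Nat) : Int)) && !pvEnds12 (PySem.List.pyGetD data (((k : Nat) : Int) - 1) 0) then
          let s := (PySem.List.pyGetD data (((k : Nat) : Int) - 1) 0) ^ 2 + (PySem.List.pyGetD data ((k : Nat) : Int) 0) ^ 2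
          if s < t then (st.1 + 1, max st.2 s) else st
        else st
      if decide (((k : Nat) : Int) + 1 < (data.length : Int)) && !pvEnds12 (PySem.List.pyGetD data (((k : Nat) : Int) + 1) 0) then
        let s := (PySem.List.pyGetD data ((k : Nat) : Int) 0) ^ 2 + (PySem.List.pyGetD data (((k : Nat) : Int) + 1) 0) ^ 2
        if s < t then (st1.1 + 1, max st1.2 s) else st1
      else st1)
    = (pvG data t k).foldl (fun st xy => (st.1 + 1, max st.2 (pvSq xy))) st := by
  have hcast1 : ((k : Int) + 1) = (((k + 1 : Nat) : Int)) := by push_cast; ring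
  have hlt : (decide (((k : Nat) : Int) + 1 < (data.length : Int))) = decide (k + 1 < data.length) := by
    simp [decide_eq_decide]; omega
  cases k with
  | zero =>
    rw [hcast1] at hlt
    simp only [hcast1, hlt, PySem.List.pyGetD_natCast,
      show (decide ((0:Int) < ((0:Nat):Int))) = false by simp, Bool.false_and, Bool.false_eq_true,
      if_false]
    simp only [pvG, pvQ, pvC, pvSq, pvPair, pvGetd,
      show (decide (0 < 0)) = false from rfl, Bool.false_and, Bool.false_eq_true, if_false,
      List.nil_append]
    by_cases h1 : 0 + 1 < data.length <;>
      by_cases h2 : pvEnds12 (data.getD (0 + 1) 0) = true <;>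
        by_cases h3 : data.getD 0 0 ^ 2 + data.getD (0 + 1) 0 ^ 2 < t <;>
          (try simp_all) <;> (split_ifs <;> simp_all)
  | succ r =>
    have hsub : (((r + 1 : Nat) : Int) - 1) = ((r : Nat) : Int) := by push_cast; ring
    rw [hcast1] at hlt
    simp only [hcast1, hlt, hsub, PySem.List.pyGetD_natCast,
      show (decide ((0:Int) < ((r + 1 : Nat):Int))) = true by simp, Bool.true_and]
    simp only [pvG, pvQ, pvC, pvSq, pvPair, pvGetd,
      show (decide (0 < r + 1)) = true by simp, Bool.true_and, Nat.add_sub_cancel]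
    by_cases hA : pvEnds12 (data.getD r 0) = true <;>
      by_cases h2 : r + 1 + 1 < data.length <;>
        by_cases hB : pvEnds12 (data.getD (r + 1 + 1) 0) = true <;>
          by_cases hx : data.getD r 0 ^ 2 + data.getD (r + 1) 0 ^ 2 < t <;>
            by_cases hy : data.getD (r + 1) 0 ^ 2 + data.getD (r + 1 + 1) 0 ^ 2 < t <;>
              (try simp_all) <;> (split_ifs <;> simp_all)

theorem solution_eq_alt (data : List Int) : solution data = solution_alt data := by
  have hsp : (PySem.List.pyRange 0 ((data.length : Int)) 1).filter
      (fun j => pvEnds12 (PySem.List.pyGetD data j 0))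
      = ((List.range data.length).filter (pvQ data)).map (fun k => ((k : Nat) : Int)) := by
    rw [PySem.List.pyRange_zero_natCast data.length, List.filter_map]
    congr 1
    apply List.filter_congr
    intro k _
    simp [Function.comp, PySem.List.pyGetD_natCast, pvQ, pvGetd]
  have hvals : (((List.range data.length).filter (pvQ data)).map (fun k => ((k : Nat) : Int))).map
      (fun j => PySem.List.pyGetD data j 0) = data.filter pvEnds12 := by
    rw [List.map_map]
    have h1 : ((fun j => PySem.List.pyGetD data j 0) ∘ fun k : Nat => ((k : Nat) : Int))
        = pvGetd data := by
      funext k; simp [Function.comp, PySem.List.pyGetD_natCast, pvGetd]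
    rw [h1, show pvQ data = pvEnds12 ∘ pvGetd data from rfl, ← List.filter_map, pvMapGet]
  unfold solution solution_alt
  rw [pvFoldl_slice2 data
      (fun st l =>
        if ((l.filter pvEnds12).length == 1) then
          match PySem.List.max? (data.filter pvEnds12) (fun y => y) with
          | some mx => if pvSumSq l < mx ^ 2 then (st.1 + 1, max st.2 (pvSumSq l)) else st
          | none => st
        else st) ((0 : Int), (0 : Int))]
  cases hmx : PySem.List.max? (data.filter pvEnds12) (fun y => y) with
  | none =>
    -- A's guard can never fire: there is no special element at all
    rw [PySem.List.foldl_congr_mem _ _ (fun st _ => st) _ (by intro acc xy _; split <;> rfl)]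
    rw [PySem.List.foldl_ignore]
    have hfe : data.filter pvEnds12 = [] := (PySem.List.max?_eq_none_iff _ _).mp hmx
    have hsn : (List.range data.length).filter (pvQ data) = [] := by
      have := hvals
      rw [hfe] at this
      exact List.map_eq_nil_iff.mp (List.map_eq_nil_iff.mp this)
    simp only [hsp, hsn, List.map_nil, List.isEmpty_nil, if_true]
  | some mx =>
    -- A side: one combined boolean test, then filter, then the shared count/max fold
    rw [PySem.List.foldl_congr_mem _ _
        (fun st xy => if (pvEnds12 xy.1 != pvEnds12 xy.2) && (pvSq xy < mx ^ 2)
                      then (st.1 + 1, max st.2 (pvSq xy)) else st) _ ?side]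
    case side =>
      intro acc xy _
      rw [pvPairFilter_len xy.1, pvSumSq_pair]
      cases hxor : (pvEnds12 xy.1 != pvEnds12 xy.2) <;>
        by_cases hlt : pvSq (xy.1, xy.2) < mx ^ 2 <;> simp [hxor, hlt]
    rw [PySem.List.foldl_if_eq_foldl_filter
        (fun xy => (pvEnds12 xy.1 != pvEnds12 xy.2) && decide (pvSq xy < mx ^ 2))
        (fun st xy => (st.1 + 1, max st.2 (pvSq xy)))]
    rw [pvFoldPairs]
    -- B side: non-empty special list, the same threshold, and the sweep over special indices
    have hne : (List.range data.length).filter (pvQ data) ≠ [] := by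
      intro h
      have hfe : List.filter pvEnds12 data = [] := by rw [← hvals, h]; simp
      rw [hfe] at hmx
      simp [PySem.List.max?] at hmx
    have hie : ((((List.range data.length).filter (pvQ data)).map
        (fun k => ((k : Nat) : Int))).isEmpty) = false := by
      simp [hne]
    simp only [hsp, hvals, hmx, hie, Bool.false_eq_true, if_false]
    rw [List.foldl_map]
    rw [PySem.List.foldl_congr_mem _ _
        (fun st k => (pvG data (mx ^ 2) k).foldl
          (fun st xy => (st.1 + 1, max st.2 (pvSq xy))) st) _
        (by intro acc k _; exact pvBody_eq data (mx ^ 2) acc k)]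
    rw [← pvFoldl_flatMap]
    rw [pvFlatMap_filter]
    rw [show (fun k => if pvQ data k then pvG data (mx ^ 2) k else []) = pvGG data (mx ^ 2)
        from rfl]
    rw [pvEmit_eq_filter]
    rw [pvFoldPairs]

-- ===== VERDICT (by name: the statement is the Claim_ definition above) =====
theorem solution_spec : Claim_equal_solution := by
  intro data _
  unfold Spec_solution
  exact solution_eq_alt data
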